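-- pv_equiv track=rewrite | github.com/Maksymilianx/Codewars_exercises | Exercises/Codility_Binary_Gap.py | solution
-- ===== SOURCE A (Python) =====
-- MAXINT = 2147483647
--
-- def solution(N):
--     """
--     Determines the maximal 'binary gap' in an integer
--     :param N: a positive integer (between 1 and maxint or 2million odd)
--     :return: a count of the longest sequence of zeros in the binary representation of the integer
--     """
--     # protect against crazy inputs
--     if not isinstance(N, int):
--         raise TypeError("Input must be an integer")
--     if N < 1:
--         raise ValueError("Input must be a positive integer")
--     if N > MAXINT:
--         raise ValueError("Input must be a positive integer less than 2,147,483,647")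
--
--     # convert the number to a string containing '0' and '1' chars
--     binary_string = str(bin(N))[2:]
--
--     # the longest binary gap: use None to indicate no 'gap' yet found (set to zero at the first flip)
--     max_count = None
--     # count the bits in the sequence
--     this_count = 0
--     # true if the last bit was a zero
--     was_zero = None
--
--     # loop over all the 0/1 chars in the string
--     for bit in binary_string:
--         is_zero = bit == '0'
--
--         # if the bit value has flipped
--         if bool(was_zero) != bool(is_zero):
--             # the first sequence doesn't count eg: 1111001 has a result of 2
--             if max_count is None:
--                 max_count = 0
--             # save the biggest gap
--             elif this_count > max_count:
--                 max_count = this_count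
--             # reset the counter
--             this_count = 1
--         else:
--             # increment the length of the sequence
--             this_count += 1
--
--         # track what the last bit was
--         was_zero = is_zero
--
--     #print "%s: %s = %s" % (N, binary_string, max_count)
--     if max_count is not None:
--         return max_count
--     else:
--         # no binary gaps found
--         return 0
-- ===== SOURCE B (Python) =====
-- MAXINT = 2147483647
--
--
-- def solution(N):
--     """Run-length-encoding reformulation: build the list of run lengths of the
--     binary string, drop the first and last runs, and take the max (0 if none).
--     This matches the original's behavior of taking the max over all interior
--     runs (including runs of ones), dropping the leading and trailing runs."""
--     if not isinstance(N, int):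
--         raise TypeError("Input must be an integer")
--     if N < 1:
--         raise ValueError("Input must be a positive integer")
--     if N > MAXINT:
--         raise ValueError("Input must be a positive integer less than 2,147,483,647")
--
--     binary_string = bin(N)[2:]
--
--     # run-length encoding of the binary string
--     runs = []
--     prev = None
--     for bit in binary_string:
--         if bit == prev:
--             runs[-1] += 1
--         else:
--             runs.append(1)
--             prev = bit
--
--     # the first and last runs never count; 0 if there are no interior runs
--     return max(runs[1:-1], default=0)
-- ===== Notes on version B (the rewrite author's own statement) =====
-- stated objective: alternative
-- what changed: Replaces A's bit-by-bit flip/counter state machine (max_count/this_count/was_zero) with a run-length encoding of the binary string followed by a max over the interior runs runs[1:-1] (default 0), reproducing A's exact behavior of taking the max over all interior runs including runs of ones.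
-- outside the precondition, e.g. on solution(0): A raises ValueError, B raises ValueError; on solution(2147483648): A raises ValueError, B raises ValueError
import Mathlib
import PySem

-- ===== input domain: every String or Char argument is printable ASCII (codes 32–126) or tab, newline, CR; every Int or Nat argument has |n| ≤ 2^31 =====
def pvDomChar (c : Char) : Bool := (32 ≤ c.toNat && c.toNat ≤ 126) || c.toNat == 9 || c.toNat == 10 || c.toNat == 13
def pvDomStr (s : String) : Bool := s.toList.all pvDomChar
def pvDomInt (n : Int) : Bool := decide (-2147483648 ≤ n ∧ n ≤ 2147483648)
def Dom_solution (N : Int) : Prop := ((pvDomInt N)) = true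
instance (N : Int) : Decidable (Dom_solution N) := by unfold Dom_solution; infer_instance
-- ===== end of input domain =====

-- B replaces A's bit-by-bit flip/counter state machine with a run-length encoding
-- of the binary string followed by a max over the interior runs (objective: alternative).

-- ===== PORT A =====
-- bin(N)[2:] for a positive integer: the binary digits, most significant first
def binChars (n : Nat) : List Char :=
  if _h : n = 0 then [] else binChars (n / 2) ++ [if n % 2 = 1 then '1' else '0']
decreasing_by exact Nat.div_lt_self (Nat.pos_of_ne_zero _h) (by omega)

-- one iteration of A's loop over state (max_count, this_count, was_zero)
def solStep (st : Option Int × Int × Option Bool) (bit : Char) : Option Int × Int × Option Bool :=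
  let iz := bit == '0'
  if (st.2.2.getD false) != iz then
    match st.1 with
    | none => (some 0, 1, some iz)
    | some m => (some (if st.2.1 > m then st.2.1 else m), 1, some iz)
  else (st.1, st.2.1 + 1, some iz)

def solution (N : Int) : Int :=
  let binary_string := binChars N.toNat
  let st := binary_string.foldl solStep (none, 0, none)
  match st.1 with
  | some m => m
  | none => 0

-- ===== PORT B =====
-- one iteration of B's RLE loop over state (runs, prev): runs[-1] += 1 / runs.append(1)
def rleStep (st : List Int × Option Char) (bit : Char) : List Int × Option Char :=
  if some bit == st.2 then (st.1.dropLast ++ [st.1.getLastD 0 + 1], st.2)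
  else (st.1 ++ [1], some bit)

def solution_alt (N : Int) : Int :=
  let binary_string := binChars N.toNat
  let runs := (binary_string.foldl rleStep ([], none)).1
  PySem.List.maxD (PySem.List.slice runs (some 1) (some (-1))) (fun x => x) 0

-- ===== PRECONDITION & SPEC =====
-- Pre_ excludes exactly the inputs on which A raises (ValueError for N < 1 or N > MAXINT).
def Pre_solution (N : Int) : Prop := 1 ≤ N ∧ N ≤ 2147483647
instance (N : Int) : Decidable (Pre_solution N) := by unfold Pre_solution; infer_instance
def pvWitness_solution : Int := (9)

def Spec_solution (N : Int) (out : Int) : Prop := out = solution_alt N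
instance (N : Int) (out : Int) : Decidable (Spec_solution N out) := by unfold Spec_solution; infer_instance

-- ===== CLAIM (what is proved, stated in full; the proofs are below) =====
def Claim_equal_solution : Prop := ∀ (N : Int), Dom_solution N → Pre_solution N → Spec_solution N (solution N)

-- ===== LEMMAS AND PROOFS =====

-- max(xs, default=0) for an Int list, as B computes it
def pvM (l : List Int) : Int := PySem.List.maxD l (fun x => x) 0

-- A's max_count as a function of the runs accumulated so far
def pvMC (rs : List Int) : Option Int :=
  if rs.length ≤ 1 then none else some (pvM rs.tail.dropLast)

theorem pvM_append (xs : List Int) (a : Int) (ha : 0 ≤ a) :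
    pvM (xs ++ [a]) = if a > pvM xs then a else pvM xs := by
  cases xs with
  | nil =>
      have hA : pvM [a] = a := by simp [pvM, PySem.List.maxD, PySem.List.max?_id_cons]
      have hB : pvM ([] : List Int) = 0 := by simp [pvM, PySem.List.maxD, PySem.List.max?]
      rw [List.nil_append, hA, hB]
      split_ifs <;> omega
  | cons x t =>
      have hc : (x :: t) ++ [a] = x :: (t ++ [a]) := by simp
      rw [hc]
      simp only [pvM, PySem.List.maxD, PySem.List.max?_id_cons, Option.getD_some,
        List.foldl_append, List.foldl_cons, List.foldl_nil]
      rcases le_total (t.foldl max x) a with h | h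
      · rw [max_eq_right h]; split_ifs <;> omega
      · rw [max_eq_left h]; split_ifs <;> omega

theorem tail_dropLast {α : Type} (xs : List α) : xs.tail.dropLast = xs.dropLast.tail := by
  cases xs with
  | nil => rfl
  | cons x t =>
    cases t using List.reverseRecOn with
    | nil => rfl
    | append_singleton s a =>
        have h : x :: (s ++ [a]) = (x :: s) ++ [a] := rfl
        rw [h, List.dropLast_concat]
        show (s ++ [a]).dropLast = s
        simp

theorem slice_one_neg_one (runs : List Int) :
    PySem.List.slice runs (some 1) (some (-1)) = runs.tail.dropLast := by
  simp only [PySem.List.slice, PySem.List.clampIdx]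
  cases runs with
  | nil => rfl
  | cons x t =>
      have h2 : (((x :: t).length : Int) + -1).toNat = t.length := by simp
      simp only [h2]
      simp [List.dropLast_eq_take]
      split_ifs <;> omega

-- binary strings: nonempty, head '1', all chars ∈ {'0','1'}
theorem binChars_shape (n : Nat) (hn : 1 ≤ n) :
    ∃ t, binChars n = '1' :: t ∧ ∀ c ∈ t, c = '0' ∨ c = '1' := by
  induction n using Nat.strong_induction_on with
  | _ n ih =>
    rw [binChars]
    have hne : ¬ n = 0 := by omega
    simp only [hne, dite_false]
    by_cases h2 : n / 2 = 0
    · have h1 : n = 1 := by omega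
      subst h1
      exact ⟨[], by simp [binChars], by simp⟩
    · obtain ⟨t, ht, hall⟩ := ih (n / 2) (Nat.div_lt_self (by omega) (by omega)) (by omega)
      refine ⟨t ++ [if n % 2 = 1 then '1' else '0'], by rw [ht]; simp, ?_⟩
      intro c hc
      rcases List.mem_append.1 hc with h | h
      · exact hall c h
      · simp at h; subst h; split <;> simp

-- the main loop invariant: starting from matching states (A's (max_count, this_count,
-- was_zero) determined by B's accumulated run list and previous char), the two folds
-- produce equal final answers
theorem loop_inv (cs : List Char) :
    ∀ (rs : List Int) (p : Char),
    (∀ c ∈ cs, c = '0' ∨ c = '1') → (p = '0' ∨ p = '1') → rs ≠ [] → (∀ r ∈ rs, 1 ≤ r) →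
    (match (cs.foldl solStep (pvMC rs, rs.getLastD 0, some (p == '0'))).1 with
      | some m => m | none => 0)
    = pvM ((cs.foldl rleStep (rs, some p)).1.tail.dropLast) := by
  induction cs with
  | nil =>
      intro rs p _ _ hne hpos
      simp only [List.foldl_nil, pvMC]
      by_cases h1 : rs.length ≤ 1
      · simp only [h1, if_true]
        match rs, hne with
        | [x], _ => simp [pvM, PySem.List.maxD, PySem.List.max?]
      · simp [h1]
  | cons c cs ih =>
      intro rs p hcs hp hne hpos
      have hc := hcs c (by simp)
      have hconcat : ∃ ys l, rs = ys ++ [l] := by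
        rcases List.eq_nil_or_concat rs with rfl | ⟨ys, l, rfl⟩
        · exact absurd rfl hne
        · exact ⟨ys, l, by simp⟩
      obtain ⟨ys, l, rfl⟩ := hconcat
      have hl : 1 ≤ l := hpos l (by simp)
      have hcs' : ∀ x ∈ cs, x = '0' ∨ x = '1' := fun x hx => hcs x (by simp [hx])
      simp only [List.foldl_cons]
      by_cases hcp : c = p
      · -- same bit: A increments this_count, B increments the last run
        subst hcp
        have hstep1 : solStep (pvMC (ys ++ [l]), (ys ++ [l]).getLastD 0, some (c == '0')) c
            = (pvMC (ys ++ [l]), (ys ++ [l]).getLastD 0 + 1, some (c == '0')) := by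
          simp [solStep]
        have hstep2 : rleStep (ys ++ [l], some c) c = (ys ++ [l + 1], some c) := by
          simp [rleStep]
        rw [hstep1, hstep2]
        have hmc : pvMC (ys ++ [l + 1]) = pvMC (ys ++ [l]) := by
          simp only [pvMC, List.length_append, List.length_singleton]
          rw [tail_dropLast, tail_dropLast]
          simp
        have hlast : (ys ++ [l]).getLastD 0 + 1 = (ys ++ [l + 1]).getLastD 0 := by simp
        rw [hlast, ← hmc]
        exact ih (ys ++ [l + 1]) c hcs' hc (by simp)
          (by intro r hr; rcases List.mem_append.1 hr with h | h
              · exact hpos r (by simp [h])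
              · simp at h; omega)
      · -- flipped bit: A closes the current run, B appends a fresh run of length 1
        have hflip : ((p == '0') != (c == '0')) = true := by
          rcases hc with rfl | rfl <;> rcases hp with rfl | rfl <;> simp_all
        have hstep2 : rleStep (ys ++ [l], some p) c = ((ys ++ [l]) ++ [1], some c) := by
          have : (some c == some p) = false := by simp [hcp]
          simp [rleStep, this]
        rw [hstep2]
        have hpos' : ∀ r ∈ (ys ++ [l]) ++ [1], 1 ≤ r := by
          intro r hr; rcases List.mem_append.1 hr with h | h
          · exact hpos r h
          · simp at h; omega
        have hlast' : ((ys ++ [l]) ++ [1]).getLastD 0 = 1 := by simp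
        have hIH := ih ((ys ++ [l]) ++ [1]) c hcs' hc (by simp) hpos'
        rw [hlast'] at hIH
        cases ys with
        | nil =>
            -- single run so far: max_count was None, becomes Some 0
            have hmc : pvMC [l] = none := by simp [pvMC]
            have hmc' : pvMC (([] ++ [l]) ++ [1]) = some 0 := by
              simp [pvMC, pvM, PySem.List.maxD, PySem.List.max?]
            have hstep1 : solStep (pvMC ([] ++ [l]), ([] ++ [l]).getLastD 0, some (p == '0')) c
                = (some 0, 1, some (c == '0')) := by
              simp [solStep, hmc, hflip]
            rw [hstep1, ← hmc']
            exact hIH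
        | cons y ys' =>
            -- at least two runs: max_count = Some (max of interior), updated with this_count
            have hmc : pvMC (y :: (ys' ++ [l])) = some (pvM ys') := by simp [pvMC]
            have hmc' : pvMC (((y :: ys') ++ [l]) ++ [1])
                = some (pvM (ys' ++ [l])) := by
              simp [pvMC]
            have hlast : (y :: (ys' ++ [l])).getLast? = some l := by
              show ((y :: ys') ++ [l]).getLast? = some l
              exact List.getLast?_concat
            have hval : pvM (ys' ++ [l]) = if l > pvM ys' then l else pvM ys' :=
              pvM_append ys' l (by omega)
            have hstep1 : solStep (pvMC ((y :: ys') ++ [l]), ((y :: ys') ++ [l]).getLastD 0,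
                some (p == '0')) c
                = (some (pvM (ys' ++ [l])), 1, some (c == '0')) := by
              simp [solStep, hmc, hlast, hflip, hval]
            rw [hstep1, ← hmc']
            exact hIH

-- ===== VERDICT (by name: the statement is the Claim_ definition above) =====
theorem solution_spec : Claim_equal_solution := by
  intro N _ hpre
  obtain ⟨h1, h2⟩ := hpre
  unfold Spec_solution solution solution_alt
  obtain ⟨t, ht, hall⟩ := binChars_shape N.toNat (by omega)
  rw [ht]
  show (match (List.foldl solStep (none, 0, none) ('1' :: t)).1 with
        | some m => m | none => 0)
      = PySem.List.maxD (PySem.List.slice (List.foldl rleStep ([], none) ('1' :: t)).1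
          (some 1) (some (-1))) (fun x => x) 0
  rw [slice_one_neg_one]
  simp only [List.foldl_cons]
  have e1 : solStep (none, 0, none) '1' = (pvMC [1], List.getLastD [1] 0, some (('1' : Char) == '0')) := by
    simp [solStep, pvMC]
  have e2 : rleStep ([], none) '1' = ([1], some '1') := by simp [rleStep]
  rw [e1, e2]
  exact loop_inv t [1] '1' hall (Or.inr rfl) (by simp) (by simp)
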